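-- pv_equiv track=rewrite | github.com/kudep/nlp-preproc4lm | extractor.py | create_text_shards
-- ===== SOURCE A (Python) =====
-- SEP_TOKEN = " \n "
--
-- MAX_CHAR_LEN = 7000
--
-- def chunk_generator(items_list, chunk_size):
--     for i in range(0, len(items_list), chunk_size):
--         yield items_list[i : i + chunk_size]
--
-- def smart_merge_shards(shards, merge_token_len, max_char_len):  # 10000 max_char_len
--     # if len(shards) == 2:
--     #     lens = [sh["len"] for sh in shards]
--     #     shard_len = sum(lens, merge_token_len)
--     #     if shard_len < max_char_len:
--     #         shards = [{"indexes": shards[0]["indexes"] + shards[1]["indexes"], "len": shard_len}]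
--     #         return shards
--     return shards
--
-- def create_text_shards(utters):
--     shards = [{"indexes": [i], "len": len(text)} for i, text in enumerate(utters)]
--     full_merge_flag = [True]
--     res_shards = []
--     while sum(full_merge_flag, 0) and len(shards) > 1:
--         full_merge_flag.clear()
--         new_shards = []
--         for shard_pair in chunk_generator(shards, 2):
--             merged_shards = smart_merge_shards(shard_pair, len(SEP_TOKEN), MAX_CHAR_LEN)
--             full_merge_flag.append(len(shard_pair) != len(merged_shards))
--             new_shards.extend(merged_shards)
--         shards = new_shards
--         new_shards = []
--         for shard_pair in chunk_generator(shards[1:], 2):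
--             merged_shards = smart_merge_shards(shard_pair, len(SEP_TOKEN), MAX_CHAR_LEN)
--             full_merge_flag.append(len(shard_pair) != len(merged_shards))
--             new_shards.extend(merged_shards)
--         shards = shards[:1] + new_shards
--         res_shards.clear()
--         res_shards.extend(shards)
--     text_shards = [SEP_TOKEN.join([str(utters[index]) for index in shard["indexes"]]) for shard in shards]
--     return text_shards
-- ===== SOURCE B (Python) =====
-- def create_text_shards(utters):
--     # The merge step is disabled (smart_merge_shards is a no-op), so every shard
--     # holds exactly one utterance: just map each utterance to its string form.
--     return [str(u) for u in utters]
-- ===== Notes on version B (the rewrite author's own statement) =====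
-- stated objective: simpler
-- what changed: Dropped the shard/merge machinery (the merge helper is a no-op, so the while-loop never changes the shards) and replaced it with a single map of str over the utterances.
import Mathlib
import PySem

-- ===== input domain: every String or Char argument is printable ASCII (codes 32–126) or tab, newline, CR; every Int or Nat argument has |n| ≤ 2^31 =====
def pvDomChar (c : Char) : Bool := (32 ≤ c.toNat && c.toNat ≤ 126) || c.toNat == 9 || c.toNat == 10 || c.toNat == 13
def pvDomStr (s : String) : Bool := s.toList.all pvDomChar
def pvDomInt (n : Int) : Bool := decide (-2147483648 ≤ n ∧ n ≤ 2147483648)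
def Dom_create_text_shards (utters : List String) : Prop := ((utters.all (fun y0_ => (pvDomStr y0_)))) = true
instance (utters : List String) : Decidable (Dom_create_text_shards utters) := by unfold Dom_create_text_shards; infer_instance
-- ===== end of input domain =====

-- B drops A's shard/merge machinery (whose merge helper is a no-op, so the loop never changes
-- the shards) and simply maps str over the utterances; objective: simpler.

-- ===== PORT A =====
def SEP_TOKEN : String := " \n "
def MAX_CHAR_LEN : Int := 7000

-- chunk_generator(items_list, chunk_size): successive slices items_list[i:i+chunk_size];
-- the k = 0 guard only makes the recursion total (Python raises there; A only calls k = 2).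
def chunk_generator {α : Type} (xs : List α) (k : Nat) : List (List α) :=
  if xs = [] ∨ k = 0 then [] else xs.take k :: chunk_generator (xs.drop k) k
termination_by xs.length
decreasing_by
  rename_i h
  have hx : xs ≠ [] := fun he => h (Or.inl he)
  have : xs.length ≠ 0 := by simpa [List.length_eq_zero_iff] using hx
  simp [List.length_drop]; omega

-- smart_merge_shards: the whole merge body is commented out in the source; it returns its input.
def smart_merge_shards (shards : List (List Int × Int)) (merge_token_len : Int)
    (max_char_len : Int) : List (List Int × Int) := shards

-- the while-loop of create_text_shards; fuel only makes the recursion total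
-- (the loop provably exits after one pass, since every merge leaves lengths unchanged)
def shards_loop (fuel : Nat) (full_merge_flag : List Bool)
    (shards : List (List Int × Int)) : List (List Int × Int) :=
  match fuel with
  | 0 => shards
  | fuel + 1 =>
    if (full_merge_flag.foldl (fun a b => a + (if b then (1 : Int) else 0)) 0) ≠ 0 ∧
        shards.length > 1 then
      let chunks1 := chunk_generator shards 2
      let flags1 := chunks1.map (fun p =>
        decide (p.length ≠ (smart_merge_shards p (PySem.Str.len SEP_TOKEN) MAX_CHAR_LEN).length))
      let shards1 := (chunks1.map (fun p =>
        smart_merge_shards p (PySem.Str.len SEP_TOKEN) MAX_CHAR_LEN)).flatten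
      let chunks2 := chunk_generator (PySem.List.slice shards1 (some 1) none) 2
      let flags2 := chunks2.map (fun p =>
        decide (p.length ≠ (smart_merge_shards p (PySem.Str.len SEP_TOKEN) MAX_CHAR_LEN).length))
      let new2 := (chunks2.map (fun p =>
        smart_merge_shards p (PySem.Str.len SEP_TOKEN) MAX_CHAR_LEN)).flatten
      let shards2 := PySem.List.slice shards1 none (some 1) ++ new2
      shards_loop fuel (flags1 ++ flags2) shards2
    else shards

def create_text_shards (utters : List String) : List String :=
  let shards0 := (PySem.List.enumerate utters 0).map
    (fun it => ([it.1], (PySem.Str.len it.2 : Int)))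
  -- res_shards only mirrors shards and never feeds the result; it is not carried.
  let shards := shards_loop (utters.length + 1) [true] shards0
  shards.map (fun sh =>
    PySem.Str.join SEP_TOKEN (sh.1.map (fun idx => (PySem.List.pyGet? utters idx).getD "")))

-- ===== PORT B =====
def create_text_shards_alt (utters : List String) : List String :=
  utters.map (fun u => u)

-- ===== PRECONDITION & SPEC =====
def Spec_create_text_shards (utters : List String) (out : List String) : Prop := out = create_text_shards_alt utters
instance (utters : List String) (out : List String) : Decidable (Spec_create_text_shards utters out) := by unfold Spec_create_text_shards; infer_instance

-- ===== CLAIM (what is proved, stated in full; the proofs are below) =====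
def Claim_equal_create_text_shards : Prop := ∀ (utters : List String), Dom_create_text_shards utters → Spec_create_text_shards utters (create_text_shards utters)

-- ===== LEMMAS AND PROOFS =====

-- chunking then flattening reproduces the list
theorem flatten_chunk_generator {α : Type} (xs : List α) :
    (chunk_generator xs 2).flatten = xs := by
  induction xs using chunk_generator.induct (k := 2) with
  | case1 xs h =>
    rcases h with h | h
    · subst h; simp [chunk_generator]
    · omega
  | case2 xs h ih =>
    rw [chunk_generator]
    simp only [if_neg h, List.flatten_cons, ih, List.take_append_drop]

-- the merge helper is the identity, so one loop pass maps shards to themselves;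
-- hence the loop returns its shards unchanged for every fuel and flag list
theorem shards_loop_id (fuel : Nat) :
    ∀ (flags : List Bool) (s : List (List Int × Int)), shards_loop fuel flags s = s := by
  induction fuel with
  | zero => intro flags s; rfl
  | succ fuel ih =>
    intro flags s
    rw [shards_loop]
    split
    · rw [ih]
      simp only [smart_merge_shards, List.map_id_fun', id, flatten_chunk_generator]
      have h1 : PySem.List.slice s (some 1) = s.drop 1 := PySem.List.slice_from s (by omega)
      have h2 : PySem.List.slice s none (some 1) = s.take 1 := PySem.List.slice_to s (by omega)
      simp only [h1, h2]
      exact List.take_append_drop _ s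
    · rfl

-- ===== VERDICT (by name: the statement is the Claim_ definition above) =====
theorem create_text_shards_spec : Claim_equal_create_text_shards := by
  intro utters _
  unfold Spec_create_text_shards create_text_shards create_text_shards_alt
  simp only [shards_loop_id, List.map_map, List.map_id_fun']
  apply List.ext_getElem
  · simp [PySem.List.length_enumerate]
  · intro k hk hk'
    simp only [List.getElem_map, PySem.List.getElem_enumerate, Function.comp]
    have hk2 : k < utters.length := by
      simpa [PySem.List.length_enumerate] using hk
    simp [PySem.Str.join, PySem.List.pyGet?, PySem.List.pyIdx?, hk2]
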